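-- pv_equiv track=rewrite | github.com/oth54477/TIL | 프로그래머스/lv1/12982. 예산/예산.py | solution
-- ===== SOURCE A (Python) =====
-- def solution(d, budget):
--     d.sort()
--     for i in range(len(d), 0, -1):
--         if sum(d[:i]) <= budget:
--             break
--     else:
--         i = 0
--     return i
-- ===== SOURCE B (Python) =====
-- def solution(d, budget):
--     d.sort()
--     total = 0
--     best = 0
--     for i, x in enumerate(d, 1):
--         total += x
--         if total <= budget:
--             best = i
--     return best
-- ===== Notes on version B (the rewrite author's own statement) =====
-- stated objective: alternative
-- what changed: Replaced the descending loop that recomputes sum(d[:i]) from scratch at each i until the prefix fits with a single forward pass over the sorted list keeping a running prefix sum and recording the last prefix length that fits the budget.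
import Mathlib
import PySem

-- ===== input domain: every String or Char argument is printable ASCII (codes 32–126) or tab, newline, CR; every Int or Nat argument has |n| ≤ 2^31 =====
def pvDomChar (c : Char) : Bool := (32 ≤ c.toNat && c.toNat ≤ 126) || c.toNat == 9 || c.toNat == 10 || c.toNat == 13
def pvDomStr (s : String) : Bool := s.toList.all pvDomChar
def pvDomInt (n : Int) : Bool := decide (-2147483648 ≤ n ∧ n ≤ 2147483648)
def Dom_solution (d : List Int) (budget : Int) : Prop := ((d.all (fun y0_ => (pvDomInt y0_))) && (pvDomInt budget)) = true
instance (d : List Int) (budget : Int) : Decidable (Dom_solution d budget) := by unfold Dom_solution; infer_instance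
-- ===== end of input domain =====

-- B replaces A's descending search (sum(d[:i]) recomputed per i) with one forward running-sum
-- pass over the sorted list; equivalence is about the RETURN value only (both Pythons sort d in place).

-- ===== PORT A =====
-- 'for i in range(len(d), 0, -1): if sum(d[:i]) <= budget: break / else: i = 0'
def solLoopA (s : List Int) (budget : Int) : List Int → Int
  | [] => 0
  | i :: rest =>
      if (PySem.List.slice s none (some i)).sum ≤ budget then i
      else solLoopA s budget rest

def solution (d : List Int) (budget : Int) : Int :=
  solLoopA (PySem.List.sorted d (fun x => x) false) budget
    (PySem.List.pyRange ((PySem.List.sorted d (fun x => x) false).length : Int) 0 (-1))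

-- ===== PORT B =====
-- 'total = 0; best = 0; for i, x in enumerate(d, 1): total += x; if total <= budget: best = i'
def solution_alt (d : List Int) (budget : Int) : Int :=
  ((PySem.List.enumerate (PySem.List.sorted d (fun x => x) false) 1).foldl
    (fun st p =>
      let total := st.1 + p.2
      (total, if total ≤ budget then p.1 else st.2))
    (0, 0)).2

-- ===== PRECONDITION & SPEC =====
def Spec_solution (d : List Int) (budget : Int) (out : Int) : Prop := out = solution_alt d budget
instance (d : List Int) (budget : Int) (out : Int) : Decidable (Spec_solution d budget out) := by unfold Spec_solution; infer_instance

-- ===== CLAIM (what is proved, stated in full; the proofs are below) =====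
def Claim_equal_solution : Prop := ∀ (d : List Int) (budget : Int), Dom_solution d budget → Spec_solution d budget (solution d budget)

-- ===== LEMMAS AND PROOFS =====

-- the value both programs compute: the largest k ≤ n with (take k).sum ≤ budget, else 0
def bestIdx (budget : Int) (s : List Int) : Nat → Int
  | 0 => 0
  | n + 1 => if (s.take (n + 1)).sum ≤ budget then ((n + 1 : Nat) : Int) else bestIdx budget s n

theorem solLoopA_eq_bestIdx (s : List Int) (budget : Int) (n : Nat) :
    solLoopA s budget (PySem.List.pyRange (n : Int) 0 (-1)) = bestIdx budget s n := by
  induction n with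
  | zero => simp [PySem.List.pyRange_neg_one_eq_nil (by omega : (0:Int) ≤ 0), solLoopA, bestIdx]
  | succ n ih =>
      rw [PySem.List.pyRange_neg_one_cons (by exact_mod_cast Nat.succ_pos n)]
      have h1 : ((n + 1 : Nat) : Int) - 1 = (n : Int) := by push_cast; ring
      rw [solLoopA, h1, ih, PySem.List.slice_to_natCast, bestIdx]

theorem bestIdx_append (budget : Int) (l : List Int) (x : Int) (k : Nat) (hk : k ≤ l.length) :
    bestIdx budget (l ++ [x]) k = bestIdx budget l k := by
  induction k with
  | zero => rfl
  | succ k ih =>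
      rw [bestIdx, bestIdx, List.take_append_of_le_length hk, ih (by omega)]

theorem foldB_eq_bestIdx (budget : Int) (l : List Int) :
    (PySem.List.enumerate l 1).foldl
      (fun st p =>
        let total := st.1 + p.2
        (total, if total ≤ budget then p.1 else st.2))
      (0, 0) = (l.sum, bestIdx budget l l.length) := by
  induction l using List.reverseRecOn with
  | nil => rfl
  | append_singleton l x ih =>
      rw [PySem.List.enumerate_append, List.foldl_append, ih]
      simp only [PySem.List.enumerate_cons, PySem.List.enumerate_nil, List.foldl_cons,
        List.foldl_nil, List.length_append, List.length_cons, List.length_nil]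
      simp only [Nat.zero_add]
      rw [bestIdx, List.take_of_length_le (by simp), bestIdx_append budget l x l.length le_rfl]
      have hcast : (1 : Int) + (l.length : Int) = ((l.length + 1 : Nat) : Int) := by push_cast; ring
      simp [List.sum_append, hcast]

theorem solution_eq_alt (d : List Int) (budget : Int) :
    solution d budget = solution_alt d budget := by
  unfold solution solution_alt
  rw [solLoopA_eq_bestIdx, foldB_eq_bestIdx]

-- ===== VERDICT (by name: the statement is the Claim_ definition above) =====
theorem solution_spec : Claim_equal_solution := by
  intro d budget _
  unfold Spec_solution
  exact solution_eq_alt d budget
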